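-- pv_equiv track=rewrite | github.com/jdavidpm/networking-basics | subnet-calculator/netUtilities.py | byteBro
-- ===== SOURCE A (Python) =====
-- def byteBro (i, bitsBorrowed, ipClass, rangeS): #Regresa los bytes de broadcast y host
-- 	if (ipClass == 'A'):
-- 		if (bitsBorrowed <= 8):
-- 			return str(((i << (8 - bitsBorrowed)) + ((2 ** (8 - bitsBorrowed)) - 1))) + '.255.' + str (255 - rangeS)
-- 		elif (bitsBorrowed <= 16):
-- 			aux = bin(i)[2:]
-- 			preSeparate = ''.join([str(i - i) for i in range(0, bitsBorrowed - len(aux))]) + aux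
-- 			fByte = preSeparate[:8]
-- 			sByte = preSeparate[8:] + ''.join([str(i//i) for i in range(1, 9 - len(preSeparate[8:]))])
-- 			return str(int(fByte, 2)) + '.' + str(int(sByte, 2)) + '.' + str (255 - rangeS)
-- 		else:
-- 			aux = bin(i)[2:]
-- 			preSeparate = ''.join([str(i - i) for i in range(0, bitsBorrowed - len(aux))]) + aux
-- 			fByte = preSeparate[:8]
-- 			sByte = preSeparate[8:16]
-- 			tByte = preSeparate[16:] + ''.join([str(i//i) for i in range (1, 9 - len(preSeparate[16:]))])
-- 			return str(int(fByte, 2)) + '.' + str(int(sByte, 2)) + '.' + str (int(tByte, 2) - rangeS)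
--
-- 	elif (ipClass == 'B'):
-- 		if (bitsBorrowed <= 8):
-- 			return str((i << (8 - bitsBorrowed)) + ((2 ** (8 - bitsBorrowed)) - 1)) + '.' + str (255 - rangeS)
-- 		else:
-- 			aux = bin(i)[2:]
-- 			preSeparate = ''.join([str(i - i) for i in range(0, bitsBorrowed - len(aux))]) + aux
-- 			fByte = preSeparate[:8]
-- 			sByte = preSeparate[8:] + ''.join([str(i//i) for i in range(1, 9 - len(preSeparate[8:]))])
-- 			return str(int(fByte, 2)) + '.' + str(int(sByte, 2) - rangeS)
--
-- 	elif (ipClass == 'C'):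
-- 		return str(((i << (8 - bitsBorrowed)) + ((2 ** (8 - bitsBorrowed)) - 1)) - rangeS)
-- ===== SOURCE B (Python) =====
-- # B: fixed-width integer bit arithmetic instead of bin()-string padding/slicing:
-- # each multi-byte branch fills the remaining host bits of the 16- or 24-bit
-- # prefix with 1s and extracts the bytes with shifts and masks.
--
-- def byteBro(i, bitsBorrowed, ipClass, rangeS):
--     if ipClass == 'A':
--         if bitsBorrowed <= 8:
--             return f"{(i << (8 - bitsBorrowed)) + (1 << (8 - bitsBorrowed)) - 1}.255.{255 - rangeS}"
--         elif bitsBorrowed <= 16: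
--             v = (i << (16 - bitsBorrowed)) + (1 << (16 - bitsBorrowed)) - 1
--             return f"{v >> 8}.{v & 255}.{255 - rangeS}"
--         else:
--             v = (i << (24 - bitsBorrowed)) + (1 << (24 - bitsBorrowed)) - 1
--             return f"{v >> 16}.{(v >> 8) & 255}.{(v & 255) - rangeS}"
--     elif ipClass == 'B':
--         if bitsBorrowed <= 8:
--             return f"{(i << (8 - bitsBorrowed)) + (1 << (8 - bitsBorrowed)) - 1}.{255 - rangeS}"
--         else:
--             v = (i << (16 - bitsBorrowed)) + (1 << (16 - bitsBorrowed)) - 1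
--             return f"{v >> 8}.{(v & 255) - rangeS}"
--     elif ipClass == 'C':
--         return f"{(i << (8 - bitsBorrowed)) + (1 << (8 - bitsBorrowed)) - 1 - rangeS}"
-- ===== Notes on version B (the rewrite author's own statement) =====
-- stated objective: alternative
-- what changed: The bin()-string branches (pad with '0'*k, slice [:8]/[8:16]/[16:], pad with '1'*k, reparse with int(.,2)) are replaced by fixed-width integer bit arithmetic: v = (i << (T - bitsBorrowed)) + (1 << (T - bitsBorrowed)) - 1 with T = 16 or 24, bytes extracted by shifts and masks; Pre_ restricts to the natural subnet domain (0 <= i < 2^bitsBorrowed, bitsBorrowed within the class's host-bit budget: <=24 for A, <=16 for B, <=8 for C, and nonnegative), outside which A raises or returns accidental overflow/misalignment strings.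
-- outside the precondition, e.g. on byteBro(600, 9, 'A', 0): A returns '150.63.255', B returns '300.127.255'; on byteBro(0, 17, 'B', 0): A returns '0.0', B raises ValueError; on byteBro(0, 25, 'A', 0): A returns '0.0.0', B raises ValueError
import Mathlib
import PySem

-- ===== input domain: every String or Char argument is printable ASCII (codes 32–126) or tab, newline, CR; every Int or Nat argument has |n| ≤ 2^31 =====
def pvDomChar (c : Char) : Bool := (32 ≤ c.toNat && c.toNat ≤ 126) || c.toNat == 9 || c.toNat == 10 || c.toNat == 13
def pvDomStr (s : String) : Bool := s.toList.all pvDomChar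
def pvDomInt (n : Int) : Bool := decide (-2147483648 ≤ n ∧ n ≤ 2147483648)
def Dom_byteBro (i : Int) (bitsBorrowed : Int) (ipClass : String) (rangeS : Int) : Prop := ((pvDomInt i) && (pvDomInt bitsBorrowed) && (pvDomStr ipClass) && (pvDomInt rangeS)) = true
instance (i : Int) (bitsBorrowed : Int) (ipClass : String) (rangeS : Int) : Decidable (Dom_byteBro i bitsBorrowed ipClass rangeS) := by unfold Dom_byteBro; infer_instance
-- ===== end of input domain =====

-- B replaces A's bin()-string padding/slicing with fixed-width integer shift/mask byte extraction.

-- ===== PORT A =====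
-- hand port of bin(n) without the '0b' prefix, for n : Nat (MSB first; bin(0)[2:] = "0" handled at the call site)
def binDigits : Nat → List Char
  | 0 => []
  | n+1 => binDigits ((n+1)/2) ++ [if (n+1) % 2 = 1 then '1' else '0']
decreasing_by exact Nat.div_lt_self (Nat.succ_pos n) one_lt_two

-- bin(i)[2:] : Python's bin(i) is '-0b…' for i < 0, so slicing [2:] leaves 'b' + the digits of |i|
def pyBinTail (i : Int) : List Char :=
  if i < 0 then 'b' :: binDigits i.natAbs
  else if i = 0 then ['0'] else binDigits i.toNat

def isBit (c : Char) : Bool := c == '0' || c == '1'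

def bitsVal (l : List Char) : Nat := l.foldl (fun a c => 2 * a + (if c = '1' then 1 else 0)) 0

-- int(s, 2) on strings over {'0','1','b'} (the only chars the slices of bin(i)[2:] contain):
-- Python accepts one literal '0b' prefix, then needs a nonempty run of binary digits; ValueError → none
def intOfBin2? (s : List Char) : Option Int :=
  let t := if s.take 2 = ['0', 'b'] then s.drop 2 else s
  if t ≠ [] ∧ t.all isBit then some (bitsVal t : Int) else none

-- ''.join(str(i-i) for i in range(0,k)) = '0'*max(k,0) ; ''.join(str(i//i) for i in range(1,9-len)) = '1'*max(8-len,0)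
def byteBro (i : Int) (bitsBorrowed : Int) (ipClass : String) (rangeS : Int) : Option String :=
  if ipClass = "A" then
    if bitsBorrowed ≤ 8 then
      some (PySem.Int.toStr (i * 2 ^ (8 - bitsBorrowed).toNat + ((2 : Int) ^ (8 - bitsBorrowed).toNat - 1)) ++ ".255." ++ PySem.Int.toStr (255 - rangeS))
    else if bitsBorrowed ≤ 16 then
      let aux := pyBinTail i
      let preSeparate := List.replicate (bitsBorrowed - (aux.length : Int)).toNat '0' ++ aux
      let fByte := preSeparate.take 8
      let sByte := preSeparate.drop 8 ++ List.replicate ((8 : Int) - ((preSeparate.drop 8).length : Int)).toNat '1'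
      match intOfBin2? fByte, intOfBin2? sByte with
      | some f, some s => some (PySem.Int.toStr f ++ "." ++ PySem.Int.toStr s ++ "." ++ PySem.Int.toStr (255 - rangeS))
      | _, _ => none
    else
      let aux := pyBinTail i
      let preSeparate := List.replicate (bitsBorrowed - (aux.length : Int)).toNat '0' ++ aux
      let fByte := preSeparate.take 8
      let sByte := (preSeparate.drop 8).take 8
      let tByte := preSeparate.drop 16 ++ List.replicate ((8 : Int) - ((preSeparate.drop 16).length : Int)).toNat '1'
      match intOfBin2? fByte, intOfBin2? sByte, intOfBin2? tByte with
      | some f, some s, some t => some (PySem.Int.toStr f ++ "." ++ PySem.Int.toStr s ++ "." ++ PySem.Int.toStr (t - rangeS))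
      | _, _, _ => none
  else if ipClass = "B" then
    if bitsBorrowed ≤ 8 then
      some (PySem.Int.toStr (i * 2 ^ (8 - bitsBorrowed).toNat + ((2 : Int) ^ (8 - bitsBorrowed).toNat - 1)) ++ "." ++ PySem.Int.toStr (255 - rangeS))
    else
      let aux := pyBinTail i
      let preSeparate := List.replicate (bitsBorrowed - (aux.length : Int)).toNat '0' ++ aux
      let fByte := preSeparate.take 8
      let sByte := preSeparate.drop 8 ++ List.replicate ((8 : Int) - ((preSeparate.drop 8).length : Int)).toNat '1'
      match intOfBin2? fByte, intOfBin2? sByte with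
      | some f, some s => some (PySem.Int.toStr f ++ "." ++ PySem.Int.toStr (s - rangeS))
      | _, _ => none
  else if ipClass = "C" then
    if 8 < bitsBorrowed then none   -- i << (8 - bitsBorrowed) raises ValueError (negative shift)
    else some (PySem.Int.toStr (i * 2 ^ (8 - bitsBorrowed).toNat + ((2 : Int) ^ (8 - bitsBorrowed).toNat - 1) - rangeS))
  else none

-- ===== PORT B =====
-- v >> k is ported as floordiv v 2^k and v & (2^k - 1) as mod v 2^k: both exact for every Int (Python's
-- arithmetic right shift floors, and masking by 2^k-1 is the nonnegative remainder mod 2^k); a negative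
-- shift count (16/24 - bitsBorrowed < 0) raises ValueError in Python → none here.
def byteBro_alt (i : Int) (bitsBorrowed : Int) (ipClass : String) (rangeS : Int) : Option String :=
  if ipClass = "A" then
    if bitsBorrowed ≤ 8 then
      some (PySem.Int.toStr (i * 2 ^ (8 - bitsBorrowed).toNat + (2 : Int) ^ (8 - bitsBorrowed).toNat - 1) ++ ".255." ++ PySem.Int.toStr (255 - rangeS))
    else if bitsBorrowed ≤ 16 then
      let v := i * 2 ^ (16 - bitsBorrowed).toNat + (2 : Int) ^ (16 - bitsBorrowed).toNat - 1
      some (PySem.Int.toStr (PySem.Int.floordiv v 256) ++ "." ++ PySem.Int.toStr (PySem.Int.mod v 256) ++ "." ++ PySem.Int.toStr (255 - rangeS))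
    else if 24 < bitsBorrowed then none
    else
      let v := i * 2 ^ (24 - bitsBorrowed).toNat + (2 : Int) ^ (24 - bitsBorrowed).toNat - 1
      some (PySem.Int.toStr (PySem.Int.floordiv v 65536) ++ "." ++ PySem.Int.toStr (PySem.Int.mod (PySem.Int.floordiv v 256) 256) ++ "." ++ PySem.Int.toStr (PySem.Int.mod v 256 - rangeS))
  else if ipClass = "B" then
    if bitsBorrowed ≤ 8 then
      some (PySem.Int.toStr (i * 2 ^ (8 - bitsBorrowed).toNat + (2 : Int) ^ (8 - bitsBorrowed).toNat - 1) ++ "." ++ PySem.Int.toStr (255 - rangeS))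
    else if 16 < bitsBorrowed then none
    else
      let v := i * 2 ^ (16 - bitsBorrowed).toNat + (2 : Int) ^ (16 - bitsBorrowed).toNat - 1
      some (PySem.Int.toStr (PySem.Int.floordiv v 256) ++ "." ++ PySem.Int.toStr (PySem.Int.mod v 256 - rangeS))
  else if ipClass = "C" then
    if 8 < bitsBorrowed then none
    else some (PySem.Int.toStr (i * 2 ^ (8 - bitsBorrowed).toNat + (2 : Int) ^ (8 - bitsBorrowed).toNat - 1 - rangeS))
  else none

-- ===== PRECONDITION & SPEC =====
-- Pre_ restricts to the function's natural subnet domain: a nonnegative subnet index i that fits in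
-- bitsBorrowed bits, with bitsBorrowed nonnegative and within the class's host-bit budget (≤24 for A,
-- ≤16 for B, ≤8 for C); outside it A either raises (negative shift count, the 'b' of bin(i) = '-0b…'
-- fed to int(·, 2)) or returns accidental overflow/misalignment strings from its no-truncation slicing.
def Pre_byteBro (i : Int) (bitsBorrowed : Int) (ipClass : String) (rangeS : Int) : Prop :=
  (ipClass = "A" ∨ ipClass = "B" ∨ ipClass = "C") →
    (0 ≤ bitsBorrowed ∧ 0 ≤ i ∧ i < (2 : Int) ^ bitsBorrowed.toNat ∧
     (ipClass = "A" → bitsBorrowed ≤ 24) ∧ (ipClass = "B" → bitsBorrowed ≤ 16) ∧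
     (ipClass = "C" → bitsBorrowed ≤ 8))
instance (i : Int) (bitsBorrowed : Int) (ipClass : String) (rangeS : Int) : Decidable (Pre_byteBro i bitsBorrowed ipClass rangeS) := by unfold Pre_byteBro; infer_instance

def pvWitness_byteBro : Int × Int × String × Int := (300, 12, "A", 10)

def Spec_byteBro (i : Int) (bitsBorrowed : Int) (ipClass : String) (rangeS : Int) (out : Option String) : Prop := out = byteBro_alt i bitsBorrowed ipClass rangeS
instance (i : Int) (bitsBorrowed : Int) (ipClass : String) (rangeS : Int) (out : Option String) : Decidable (Spec_byteBro i bitsBorrowed ipClass rangeS out) := by unfold Spec_byteBro; infer_instance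

-- ===== CLAIM (what is proved, stated in full; the proofs are below) =====
def Claim_equal_byteBro : Prop := ∀ (i : Int) (bitsBorrowed : Int) (ipClass : String) (rangeS : Int), Dom_byteBro i bitsBorrowed ipClass rangeS → Pre_byteBro i bitsBorrowed ipClass rangeS → Spec_byteBro i bitsBorrowed ipClass rangeS (byteBro i bitsBorrowed ipClass rangeS)

-- ===== LEMMAS AND PROOFS =====

theorem bitsVal_from (a : Nat) (l : List Char) :
    l.foldl (fun a c => 2 * a + (if c = '1' then 1 else 0)) a = a * 2 ^ l.length + bitsVal l := by
  induction l generalizing a with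
  | nil => simp [bitsVal]
  | cons c t ih =>
    simp only [List.foldl_cons, List.length_cons, bitsVal]
    rw [ih, ih (2 * 0 + _)]
    ring

theorem bitsVal_append (l₁ l₂ : List Char) :
    bitsVal (l₁ ++ l₂) = bitsVal l₁ * 2 ^ l₂.length + bitsVal l₂ := by
  simp only [bitsVal, List.foldl_append]
  rw [bitsVal_from]; rfl

theorem bitsVal_replicate_zero (k : Nat) : bitsVal (List.replicate k '0') = 0 := by
  induction k with
  | zero => rfl
  | succ n ih => rw [List.replicate_succ]; simp only [bitsVal, List.foldl_cons] at *; simpa using ih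

theorem bitsVal_replicate_one (k : Nat) : bitsVal (List.replicate k '1') = 2 ^ k - 1 := by
  induction k with
  | zero => rfl
  | succ n ih =>
    rw [List.replicate_succ]
    show bitsVal ('1' :: List.replicate n '1') = _
    simp only [bitsVal, List.foldl_cons] at *
    rw [bitsVal_from] at *
    simp only [List.length_replicate] at *
    have : 1 ≤ 2 ^ n := Nat.one_le_two_pow
    simp at ih ⊢
    omega

theorem bitsVal_lt (l : List Char) (h : l.all isBit) : bitsVal l < 2 ^ l.length := by
  induction l with
  | nil => simp [bitsVal]
  | cons c t ih =>
    simp only [List.all_cons, Bool.and_eq_true] at h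
    show bitsVal (c :: t) < _
    simp only [bitsVal, List.foldl_cons]
    rw [bitsVal_from]
    have := ih h.2
    simp only [List.length_cons, pow_succ]
    have hc : (if c = '1' then 1 else 0) ≤ 1 := by split <;> omega
    have h2 : 2 * 0 + (if c = '1' then 1 else 0) ≤ 1 := by omega
    calc (2*0 + (if c = '1' then 1 else 0)) * 2 ^ t.length + bitsVal t
        ≤ 1 * 2 ^ t.length + bitsVal t := by
          exact Nat.add_le_add_right (Nat.mul_le_mul_right _ h2) _
      _ < 2 ^ t.length * 2 := by omega

theorem bitsVal_take (l : List Char) (k : Nat) (h : l.all isBit) :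
    bitsVal (l.take k) = bitsVal l / 2 ^ (l.length - k) := by
  by_cases hk : l.length ≤ k
  · rw [List.take_of_length_le hk, Nat.sub_eq_zero_of_le hk]; simp
  · conv_rhs => rw [← List.take_append_drop k l]
    rw [bitsVal_append]
    have hd : (l.drop k).length = l.length - k := by simp
    have hlt : bitsVal (l.drop k) < 2 ^ (l.length - k) := by
      rw [← hd]; exact bitsVal_lt _ (by rw [List.all_eq_true] at h ⊢; exact fun c hc => h c (List.mem_of_mem_drop hc))
    simp only [List.length_append, List.length_take, List.length_drop]
    have hmin : min k l.length + (l.length - k) - k = l.length - k := by omega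
    have hp : 0 < 2 ^ (l.length - k) := Nat.two_pow_pos _
    rw [hmin, Nat.mul_comm, Nat.mul_add_div hp, Nat.div_eq_of_lt hlt]
    omega

theorem bitsVal_drop (l : List Char) (k : Nat) (h : l.all isBit) :
    bitsVal (l.drop k) = bitsVal l % 2 ^ (l.length - k) := by
  by_cases hk : l.length ≤ k
  · rw [List.drop_of_length_le hk, Nat.sub_eq_zero_of_le hk]
    simp [bitsVal, Nat.mod_one]
  · conv_rhs => rw [← List.take_append_drop k l]
    rw [bitsVal_append]
    have hd : (l.drop k).length = l.length - k := by simp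
    have hlt : bitsVal (l.drop k) < 2 ^ (l.length - k) := by
      rw [← hd]; exact bitsVal_lt _ (by rw [List.all_eq_true] at h ⊢; exact fun c hc => h c (List.mem_of_mem_drop hc))
    simp only [List.length_append, List.length_take, List.length_drop]
    have hmin : min k l.length + (l.length - k) - k = l.length - k := by omega
    rw [hmin, Nat.mul_comm, Nat.mul_add_mod, Nat.mod_eq_of_lt hlt]

theorem binDigits_spec (n : Nat) :
    (binDigits n).all isBit = true ∧ bitsVal (binDigits n) = n ∧
    ((binDigits n).length : Int) = PySem.Int.bitLength (n : Int) := by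
  induction n using Nat.strong_induction_on with
  | _ n ih =>
    match n with
    | 0 => exact ⟨by simp [binDigits], by simp [binDigits, bitsVal], by simp [binDigits, PySem.Int.bitLength_zero]⟩
    | m+1 =>
      have hlt : (m+1)/2 < m+1 := Nat.div_lt_self (Nat.succ_pos m) one_lt_two
      obtain ⟨h1, h2, h3⟩ := ih _ hlt
      rw [binDigits]
      refine ⟨?_, ?_, ?_⟩
      · simp [List.all_append, h1, isBit]; omega
      · rw [bitsVal_append, h2]
        simp only [List.length_cons, List.length_nil]
        have : bitsVal [if (m+1) % 2 = 1 then '1' else '0'] = (m+1) % 2 := by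
          split <;> simp_all [bitsVal] <;> omega
        rw [this]
        omega
      · rw [PySem.Int.bitLength_natCast (Nat.succ_pos m)]
        simp only [List.length_append, List.length_cons, List.length_nil]
        rw [Nat.cast_add, Nat.cast_one, h3]
        push_cast
        rfl

theorem intOfBin2?_digits (l : List Char) (h1 : l ≠ []) (h2 : l.all isBit) :
    intOfBin2? l = some ((bitsVal l : Nat) : Int) := by
  unfold intOfBin2?
  have hpre : ¬ (l.take 2 = ['0', 'b']) := by
    intro hc
    have : 'b' ∈ l := by
      have : 'b' ∈ l.take 2 := by rw [hc]; simp
      exact List.mem_of_mem_take this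
    rw [List.all_eq_true] at h2
    have := h2 _ this
    simp [isBit] at this
  simp only [hpre, if_false]
  rw [if_pos ⟨h1, h2⟩]

theorem pair16 (N n : Nat) (h9 : 9 ≤ n) (h16 : n ≤ 16) (hN : N < 2 ^ n) :
    (N * 2 ^ (16 - n) + (2 ^ (16 - n) - 1)) / 256 = N / 2 ^ (n - 8) ∧
    (N * 2 ^ (16 - n) + (2 ^ (16 - n) - 1)) % 256
      = (N % 2 ^ (n - 8)) * 2 ^ (16 - n) + (2 ^ (16 - n) - 1) := by
  interval_cases n <;> simp_all <;> omega

theorem pair24 (N n : Nat) (h17 : 17 ≤ n) (h24 : n ≤ 24) (hN : N < 2 ^ n) :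
    (N * 2 ^ (24 - n) + (2 ^ (24 - n) - 1)) / 65536 = N / 2 ^ (n - 8) ∧
    (N * 2 ^ (24 - n) + (2 ^ (24 - n) - 1)) / 256 % 256 = N % 2 ^ (n - 8) / 2 ^ (n - 16) ∧
    (N * 2 ^ (24 - n) + (2 ^ (24 - n) - 1)) % 256
      = (N % 2 ^ (n - 16)) * 2 ^ (24 - n) + (2 ^ (24 - n) - 1) := by
  interval_cases n <;> simp_all <;> omega

-- facts about preSeparate = '0'*(b-len(aux)) + aux for 0 ≤ i, 8 < b
theorem preFacts (i b : Int) (hi : 0 ≤ i) (hb : 8 < b) :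
    (List.replicate (b - ((pyBinTail i).length : Int)).toNat '0' ++ pyBinTail i).all isBit = true ∧
    bitsVal (List.replicate (b - ((pyBinTail i).length : Int)).toNat '0' ++ pyBinTail i) = i.toNat ∧
    (((List.replicate (b - ((pyBinTail i).length : Int)).toNat '0' ++ pyBinTail i).length : Int)
      = max b (max 1 (PySem.Int.bitLength i : Int))) := by
  have hnotneg : ¬ i < 0 := by omega
  by_cases h0 : i = 0
  · subst h0
    unfold pyBinTail
    rw [if_neg hnotneg, if_pos rfl]
    refine ⟨?_, ?_, ?_⟩
    · simp [List.all_append, List.all_replicate, isBit]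
    · rw [bitsVal_append, bitsVal_replicate_zero]
      simp [bitsVal]
    · simp only [List.length_append, List.length_replicate, List.length_cons, List.length_nil,
        PySem.Int.bitLength_zero, Nat.cast_zero]
      norm_num
      omega
  · have hpos : 0 < i.toNat := by omega
    obtain ⟨hb1, hb2, hb3⟩ := binDigits_spec i.toNat
    have hne : binDigits i.toNat ≠ [] := by
      intro hc
      rw [hc] at hb2
      simp [bitsVal] at hb2
      omega
    have hlpos : 0 < (binDigits i.toNat).length := List.length_pos_iff.mpr hne
    unfold pyBinTail
    rw [if_neg hnotneg, if_neg h0]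
    refine ⟨?_, ?_, ?_⟩
    · simp [List.all_append, List.all_replicate, isBit, hb1]
    · rw [bitsVal_append, bitsVal_replicate_zero, hb2]
      omega
    · have hcast : (PySem.Int.bitLength i : Int) = ((binDigits i.toNat).length : Int) := by
        conv_lhs => rw [← Int.toNat_of_nonneg hi]
        exact hb3.symm
      simp only [List.length_append, List.length_replicate]
      rw [hcast]
      omega

-- for 0 ≤ i < 2^b with 8 < b, preSeparate has length exactly b
theorem preLen (i b : Int) (hi : 0 ≤ i) (hb : 8 < b)
    (hlt : i < (2 : Int) ^ b.toNat) :
    (List.replicate (b - ((pyBinTail i).length : Int)).toNat '0' ++ pyBinTail i).length = b.toNat := by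
  obtain ⟨_, _, hlen⟩ := preFacts i b hi hb
  have hbl : (PySem.Int.bitLength i : Int) ≤ b := by
    by_contra hgt
    push_neg at hgt
    have hne : i ≠ 0 := by
      intro h0; rw [h0] at hgt; simp [PySem.Int.bitLength_zero] at hgt; omega
    have h1 : 2 ^ (PySem.Int.bitLength i - 1) ≤ i.natAbs := PySem.Int.two_pow_bitLength_le i hne
    have h2 : b.toNat ≤ PySem.Int.bitLength i - 1 := by omega
    have h3 : (2 : Nat) ^ b.toNat ≤ 2 ^ (PySem.Int.bitLength i - 1) := Nat.pow_le_pow_right (by norm_num) h2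
    have h4 : i.natAbs < 2 ^ b.toNat := by
      have : i < ((2 ^ b.toNat : Nat) : Int) := by push_cast; exact hlt
      omega
    omega
  omega

-- the two bytes of A's 16-bit branch agree with B's fixed-width shift/mask arithmetic
theorem val16 (i b : Int) (hi : 0 ≤ i) (hb : 8 < b) (hb16 : b ≤ 16)
    (hlt : i < (2 : Int) ^ b.toNat) :
    intOfBin2? ((List.replicate (b - ((pyBinTail i).length : Int)).toNat '0' ++ pyBinTail i).take 8)
      = some (PySem.Int.floordiv (i * 2 ^ (16 - b).toNat + (2 : Int) ^ (16 - b).toNat - 1) 256) ∧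
    intOfBin2? ((List.replicate (b - ((pyBinTail i).length : Int)).toNat '0' ++ pyBinTail i).drop 8 ++
        List.replicate ((8 : Int) - (((List.replicate (b - ((pyBinTail i).length : Int)).toNat '0' ++ pyBinTail i).drop 8).length : Int)).toNat '1')
      = some (PySem.Int.mod (i * 2 ^ (16 - b).toNat + (2 : Int) ^ (16 - b).toNat - 1) 256) := by
  obtain ⟨hall, hval, _⟩ := preFacts i b hi hb
  have hn := preLen i b hi hb hlt
  set l := List.replicate (b - ((pyBinTail i).length : Int)).toNat '0' ++ pyBinTail i with hl
  set N := i.toNat with hN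
  set n := b.toNat with hnb
  have h9 : 9 ≤ n := by omega
  have h16 : n ≤ 16 := by omega
  have hNlt : N < 2 ^ n := by
    have : i < ((2 ^ n : Nat) : Int) := by push_cast; exact hlt
    omega
  have hiN : i = (N : Int) := (Int.toNat_of_nonneg hi).symm
  have hv : i * 2 ^ (16 - b).toNat + (2 : Int) ^ (16 - b).toNat - 1
      = ((N * 2 ^ (16 - n) + (2 ^ (16 - n) - 1) : Nat) : Int) := by
    have he : (16 - b).toNat = 16 - n := by omega
    rw [he, hiN]
    have h1 : (1 : Nat) ≤ 2 ^ (16 - n) := Nat.one_le_two_pow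
    push_cast [h1]
    ring
  constructor
  · have htne : l.take 8 ≠ [] := by
      apply List.ne_nil_of_length_pos
      simp only [List.length_take]
      omega
    have hta : (l.take 8).all isBit := by
      rw [List.all_eq_true] at hall ⊢
      exact fun c hc => hall c (List.mem_of_mem_take hc)
    rw [intOfBin2?_digits _ htne hta, bitsVal_take _ _ hall, hn, hval]
    rw [hv, show (256 : Int) = ((256 : Nat) : Int) from rfl, PySem.Int.floordiv_natCast]
    rw [(pair16 N n h9 h16 hNlt).1]
  · have hdl : (l.drop 8).length = n - 8 := by simp [hn]
    have hrep : ((8 : Int) - (((l.drop 8).length : Nat) : Int)).toNat = 16 - n := by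
      rw [hdl]; omega
    have hda : (l.drop 8).all isBit := by
      rw [List.all_eq_true] at hall ⊢
      exact fun c hc => hall c (List.mem_of_mem_drop hc)
    have hane : l.drop 8 ++ List.replicate ((8 : Int) - (((l.drop 8).length : Nat) : Int)).toNat '1' ≠ [] := by
      apply List.ne_nil_of_length_pos
      simp only [List.length_append, List.length_drop]
      omega
    have haa : (l.drop 8 ++ List.replicate ((8 : Int) - (((l.drop 8).length : Nat) : Int)).toNat '1').all isBit := by
      rw [List.all_eq_true] at hda ⊢
      intro c hc
      rcases List.mem_append.mp hc with h | h
      · exact hda c h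
      · rw [List.eq_of_mem_replicate h]; rfl
    rw [intOfBin2?_digits _ hane haa, bitsVal_append, bitsVal_replicate_one,
      bitsVal_drop _ _ hall, hn, hval, List.length_replicate, hrep]
    rw [hv, show (256 : Int) = ((256 : Nat) : Int) from rfl, PySem.Int.mod_natCast]
    rw [(pair16 N n h9 h16 hNlt).2]

-- the three bytes of A's 24-bit branch agree with B's fixed-width shift/mask arithmetic
theorem val24 (i b : Int) (hi : 0 ≤ i) (hb : 16 < b) (hb24 : b ≤ 24)
    (hlt : i < (2 : Int) ^ b.toNat) :
    intOfBin2? ((List.replicate (b - ((pyBinTail i).length : Int)).toNat '0' ++ pyBinTail i).take 8)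
      = some (PySem.Int.floordiv (i * 2 ^ (24 - b).toNat + (2 : Int) ^ (24 - b).toNat - 1) 65536) ∧
    intOfBin2? (((List.replicate (b - ((pyBinTail i).length : Int)).toNat '0' ++ pyBinTail i).drop 8).take 8)
      = some (PySem.Int.mod (PySem.Int.floordiv (i * 2 ^ (24 - b).toNat + (2 : Int) ^ (24 - b).toNat - 1) 256) 256) ∧
    intOfBin2? ((List.replicate (b - ((pyBinTail i).length : Int)).toNat '0' ++ pyBinTail i).drop 16 ++
        List.replicate ((8 : Int) - (((List.replicate (b - ((pyBinTail i).length : Int)).toNat '0' ++ pyBinTail i).drop 16).length : Int)).toNat '1')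
      = some (PySem.Int.mod (i * 2 ^ (24 - b).toNat + (2 : Int) ^ (24 - b).toNat - 1) 256) := by
  obtain ⟨hall, hval, _⟩ := preFacts i b hi (by omega)
  have hn := preLen i b hi (by omega) hlt
  set l := List.replicate (b - ((pyBinTail i).length : Int)).toNat '0' ++ pyBinTail i with hl
  set N := i.toNat with hN
  set n := b.toNat with hnb
  have h17 : 17 ≤ n := by omega
  have h24 : n ≤ 24 := by omega
  have hNlt : N < 2 ^ n := by
    have : i < ((2 ^ n : Nat) : Int) := by push_cast; exact hlt
    omega
  have hiN : i = (N : Int) := (Int.toNat_of_nonneg hi).symm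
  have hv : i * 2 ^ (24 - b).toNat + (2 : Int) ^ (24 - b).toNat - 1
      = ((N * 2 ^ (24 - n) + (2 ^ (24 - n) - 1) : Nat) : Int) := by
    have he : (24 - b).toNat = 24 - n := by omega
    rw [he, hiN]
    have h1 : (1 : Nat) ≤ 2 ^ (24 - n) := Nat.one_le_two_pow
    push_cast [h1]
    ring
  have hda : (l.drop 8).all isBit := by
    rw [List.all_eq_true] at hall ⊢
    exact fun c hc => hall c (List.mem_of_mem_drop hc)
  refine ⟨?_, ?_, ?_⟩
  · have htne : l.take 8 ≠ [] := by
      apply List.ne_nil_of_length_pos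
      simp only [List.length_take]
      omega
    have hta : (l.take 8).all isBit := by
      rw [List.all_eq_true] at hall ⊢
      exact fun c hc => hall c (List.mem_of_mem_take hc)
    rw [intOfBin2?_digits _ htne hta, bitsVal_take _ _ hall, hn, hval]
    rw [hv, show (65536 : Int) = ((65536 : Nat) : Int) from rfl, PySem.Int.floordiv_natCast]
    rw [(pair24 N n h17 h24 hNlt).1]
  · have htne : (l.drop 8).take 8 ≠ [] := by
      apply List.ne_nil_of_length_pos
      simp only [List.length_take, List.length_drop]
      omega
    have hta : ((l.drop 8).take 8).all isBit := by
      rw [List.all_eq_true] at hda ⊢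
      exact fun c hc => hda c (List.mem_of_mem_take hc)
    rw [intOfBin2?_digits _ htne hta, bitsVal_take _ _ hda, bitsVal_drop _ _ hall, hn,
      hval, List.length_drop, hn]
    have hsub : n - 8 - 8 = n - 16 := by omega
    rw [hsub]
    rw [hv, show (256 : Int) = ((256 : Nat) : Int) from rfl, PySem.Int.floordiv_natCast,
      PySem.Int.mod_natCast]
    rw [(pair24 N n h17 h24 hNlt).2.1]
  · have hdl : (l.drop 16).length = n - 16 := by simp [hn]
    have hrep : ((8 : Int) - (((l.drop 16).length : Nat) : Int)).toNat = 24 - n := by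
      rw [hdl]; omega
    have hda16 : (l.drop 16).all isBit := by
      rw [List.all_eq_true] at hall ⊢
      exact fun c hc => hall c (List.mem_of_mem_drop hc)
    have hane : l.drop 16 ++ List.replicate ((8 : Int) - (((l.drop 16).length : Nat) : Int)).toNat '1' ≠ [] := by
      apply List.ne_nil_of_length_pos
      simp only [List.length_append, List.length_drop]
      omega
    have haa : (l.drop 16 ++ List.replicate ((8 : Int) - (((l.drop 16).length : Nat) : Int)).toNat '1').all isBit := by
      rw [List.all_eq_true] at hda16 ⊢
      intro c hc
      rcases List.mem_append.mp hc with h | h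
      · exact hda16 c h
      · rw [List.eq_of_mem_replicate h]; rfl
    rw [intOfBin2?_digits _ hane haa, bitsVal_append, bitsVal_replicate_one,
      bitsVal_drop _ _ hall, hn, hval, List.length_replicate, hrep]
    rw [hv, show (256 : Int) = ((256 : Nat) : Int) from rfl, PySem.Int.mod_natCast]
    rw [(pair24 N n h17 h24 hNlt).2.2]

-- ===== VERDICT (by name: the statement is the Claim_ definition above) =====
theorem byteBro_spec : Claim_equal_byteBro := by
  intro i b ipClass rangeS _hdom hpre
  unfold Spec_byteBro byteBro byteBro_alt
  by_cases hA : ipClass = "A"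
  · subst hA
    obtain ⟨hb0, hi, hlt, hA24, _, _⟩ := hpre (Or.inl rfl)
    rw [if_pos rfl, if_pos rfl]
    by_cases h8 : b ≤ 8
    · rw [if_pos h8, if_pos h8,
        show i * 2 ^ (8 - b).toNat + ((2 : Int) ^ (8 - b).toNat - 1)
           = i * 2 ^ (8 - b).toNat + (2 : Int) ^ (8 - b).toNat - 1 from by ring]
    · rw [if_neg h8, if_neg h8]
      by_cases h16 : b ≤ 16
      · rw [if_pos h16, if_pos h16]
        obtain ⟨e1, e2⟩ := val16 i b hi (by omega) h16 hlt
        simp only [e1, e2]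
      · rw [if_neg h16, if_neg h16, if_neg (by have := hA24 rfl; omega : ¬ (24 : Int) < b)]
        obtain ⟨e1, e2, e3⟩ := val24 i b hi (by omega) (hA24 rfl) hlt
        simp only [e1, e2, e3]
  · rw [if_neg hA, if_neg hA]
    by_cases hB : ipClass = "B"
    · subst hB
      obtain ⟨hb0, hi, hlt, _, hB16, _⟩ := hpre (Or.inr (Or.inl rfl))
      rw [if_pos rfl, if_pos rfl]
      by_cases h8 : b ≤ 8
      · rw [if_pos h8, if_pos h8,
          show i * 2 ^ (8 - b).toNat + ((2 : Int) ^ (8 - b).toNat - 1)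
             = i * 2 ^ (8 - b).toNat + (2 : Int) ^ (8 - b).toNat - 1 from by ring]
      · rw [if_neg h8, if_neg h8, if_neg (by have := hB16 rfl; omega : ¬ (16 : Int) < b)]
        obtain ⟨e1, e2⟩ := val16 i b hi (by omega) (hB16 rfl) hlt
        simp only [e1, e2]
    · rw [if_neg hB, if_neg hB]
      by_cases hCc : ipClass = "C"
      · subst hCc
        obtain ⟨_, _, _, _, _, hC8⟩ := hpre (Or.inr (Or.inr rfl))
        rw [if_pos rfl, if_pos rfl, if_neg (by have := hC8 rfl; omega : ¬ (8 : Int) < b),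
          if_neg (by have := hC8 rfl; omega : ¬ (8 : Int) < b),
          show i * 2 ^ (8 - b).toNat + ((2 : Int) ^ (8 - b).toNat - 1) - rangeS
             = i * 2 ^ (8 - b).toNat + (2 : Int) ^ (8 - b).toNat - 1 - rangeS from by ring]
      · rw [if_neg hCc, if_neg hCc]
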